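-- pv_equiv track=rewrite | github.com/cirosantilli/project-euler-solvers | solvers/315.py | max_total
-- ===== SOURCE A (Python) =====
-- from typing import List, Tuple
--
-- DIGIT_MASKS: List[int] = [
--     0x77,  # 0
--     0x24,  # 1
--     0x5D,  # 2
--     0x6D,  # 3
--     0x2E,  # 4
--     0x6B,  # 5
--     0x7B,  # 6
--     0x27,  # 7
--     0x7F,  # 8
--     0x6F,  # 9
-- ]
--
-- def digit_sum(n: int) -> int:
--     """Return the sum of decimal digits of n (n >= 0)."""
--     s = 0
--     while n:
--         s += n % 10
--         n //= 10
--     return s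
--
-- def segments_of_number(n: int) -> int:
--     """Return a bitmask representing all lit segments for the whole number.
--
--     Digits are right-aligned: the least significant digit occupies the lowest byte,
--     the next digit the next byte, etc. Each byte stores a 7-bit digit mask.
--     """
--     if n == 0:
--         return DIGIT_MASKS[0]
--
--     out = 0
--     shift = 0
--     while n:
--         out |= DIGIT_MASKS[n % 10] << shift
--         n //= 10
--         shift += 8
--     return out
--
-- def max_total(n: int) -> int:
--     """Total transitions for Max's clock when fed n."""
--     total = 0
--     prev = 0
--     while True:
--         seg = segments_of_number(n)
--         total += (seg ^ prev).bit_count()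
--         if n < 10:
--             total += seg.bit_count()  # fade to black
--             return total
--         prev = seg
--         n = digit_sum(n)
-- ===== SOURCE B (Python) =====
-- from typing import List
--
-- DIGIT_MASKS: List[int] = [
--     0x77,  # 0
--     0x24,  # 1
--     0x5D,  # 2
--     0x6D,  # 3
--     0x2E,  # 4
--     0x6B,  # 5
--     0x7B,  # 6
--     0x27,  # 7
--     0x7F,  # 8
--     0x6F,  # 9
-- ]
--
-- # Per-digit precomputed tables: ON[d] = lit-segment count of digit d,
-- # XT[a][b] = segments that change when digit a is replaced by digit b.
-- ON: List[int] = [bin(m).count("1") for m in DIGIT_MASKS]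
-- XT: List[List[int]] = [[bin(a ^ b).count("1") for b in DIGIT_MASKS] for a in DIGIT_MASKS]
--
-- def _digits(n: int) -> List[int]:
--     """Little-endian decimal digits of n (n >= 0)."""
--     if n < 10:
--         return [n]
--     return [n % 10] + _digits(n // 10)
--
-- def max_total(n: int) -> int:
--     """Total transitions for Max's clock when fed n."""
--     # Work digit-by-digit with 10x10 lookup tables: no packed segment masks,
--     # no big-integer xor/popcount at all.
--     cur = _digits(n)
--     total = sum(ON[d] for d in cur)          # blank screen -> first display
--     while len(cur) > 1:
--         nxt = _digits(sum(cur))              # next value of the chain, as digits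
--         total += sum(XT[a][b] for a, b in zip(cur, nxt))
--         total += sum(ON[d] for d in cur[len(nxt):])   # digits that go dark
--         cur = nxt
--     return total + sum(ON[d] for d in cur)   # fade to black
-- ===== Notes on version B (the rewrite author's own statement) =====
-- stated objective: alternative
-- what changed: B never builds packed segment bitmasks or xors big integers: it works on little-endian digit lists and sums precomputed 10x10 per-digit transition counts XT[a][b] (plus ON[d] for digits that appear/disappear), exploiting that clock transitions decompose digit-position-wise.
import Mathlib
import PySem

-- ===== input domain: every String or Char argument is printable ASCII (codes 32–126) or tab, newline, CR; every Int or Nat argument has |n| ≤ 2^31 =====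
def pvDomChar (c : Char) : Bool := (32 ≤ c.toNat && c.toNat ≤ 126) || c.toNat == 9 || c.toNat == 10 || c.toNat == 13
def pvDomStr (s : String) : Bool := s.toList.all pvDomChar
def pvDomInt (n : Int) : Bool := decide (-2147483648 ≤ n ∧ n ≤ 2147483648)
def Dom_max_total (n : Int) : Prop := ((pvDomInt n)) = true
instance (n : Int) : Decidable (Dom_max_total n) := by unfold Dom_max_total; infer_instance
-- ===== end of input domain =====

-- B is a different algorithm: it never builds packed segment bitmasks and never
-- xors big integers; it works on little-endian digit lists and sums precomputed
-- 10x10 per-digit transition counts (transitions decompose digit-position-wise).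
-- The Python 'while' loops are ported with a structural fuel counter (a totality
-- guard only: the fuel always suffices on the nonnegative inputs of Pre_; Python
-- diverges on negative inputs, which Pre_ excludes).

-- ===== PORT A =====
def DIGIT_MASKS : List Int := [0x77, 0x24, 0x5D, 0x6D, 0x2E, 0x6B, 0x7B, 0x27, 0x7F, 0x6F]

-- 'while n' in digit_sum; on nonnegative inputs the test is positivity
def digit_sum_fuel : Nat → Int → Int → Int
  | 0, s, _ => s
  | f + 1, s, n =>
    if 0 < n then digit_sum_fuel f (s + PySem.Int.mod n 10) (PySem.Int.floordiv n 10) else s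

def digit_sum (n : Int) : Int := digit_sum_fuel n.toNat 0 n

-- the 'while n' loop of segments_of_number
def seg_fuel : Nat → Int → Nat → Int → Int
  | 0, out, _, _ => out
  | f + 1, out, shift, n =>
    if 0 < n then
      seg_fuel f
        (PySem.Int.bor out ((PySem.List.pyGetD DIGIT_MASKS (PySem.Int.mod n 10) 0) <<< shift))
        (shift + 8) (PySem.Int.floordiv n 10)
    else out

def segments_of_number (n : Int) : Int :=
  if n = 0 then PySem.List.pyGetD DIGIT_MASKS 0 0
  else seg_fuel n.toNat 0 0 n

-- the 'while True' loop of max_total, state (total, prev, n)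
def max_total_fuel : Nat → Int → Int → Int → Int
  | 0, total, _, _ => total
  | f + 1, total, prev, n =>
    let seg := segments_of_number n
    if n < 10 then
      total + (PySem.Int.bitCount (PySem.Int.bxor seg prev) : Int)
            + (PySem.Int.bitCount seg : Int)
    else
      max_total_fuel f (total + (PySem.Int.bitCount (PySem.Int.bxor seg prev) : Int)) seg
        (digit_sum n)

def max_total (n : Int) : Int := max_total_fuel (n.toNat + 1) 0 0 n

-- ===== PORT B =====
-- ON[d] = bin(m).count("1") of digit d's mask; XT[a][b] = popcount of mask xor
def ONt : List Int := DIGIT_MASKS.map (fun m => (PySem.Int.bitCount m : Int))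

def XTt : List (List Int) :=
  DIGIT_MASKS.map (fun a => DIGIT_MASKS.map (fun b => (PySem.Int.bitCount (PySem.Int.bxor a b) : Int)))

-- _digits: recursion on n // 10, with a fuel counter as totality guard
def digitsB_fuel : Nat → Int → List Int
  | 0, n => [n]
  | f + 1, n =>
    if n < 10 then [n]
    else PySem.Int.mod n 10 :: digitsB_fuel f (PySem.Int.floordiv n 10)

def digitsB (n : Int) : List Int := digitsB_fuel n.toNat n

-- sum(ON[d] for d in l)
def sumON (l : List Int) : Int := (l.map (fun d => PySem.List.pyGetD ONt d 0)).sum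

-- XT[a][b]
def xtAt (a b : Int) : Int := PySem.List.pyGetD (PySem.List.pyGetD XTt a []) b 0

-- the 'while len(cur) > 1' loop; the else branch is Source B's post-loop return
def loopB : Nat → Int → List Int → Int
  | 0, total, _ => total
  | f + 1, total, cur =>
    if 1 < cur.length then
      let nxt := digitsB cur.sum
      loopB f
        (total + ((cur.zip nxt).map (fun p => xtAt p.1 p.2)).sum
               + sumON (cur.drop nxt.length))
        nxt
    else total + sumON cur

def max_total_alt (n : Int) : Int :=
  let cur := digitsB n
  loopB (n.toNat + 1) (sumON cur) cur

-- ===== PRECONDITION & SPEC =====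
-- Pre_ excludes negative inputs, on which Python A never returns (the while loop
-- in segments_of_number spins forever: repeated floor division never reaches zero
-- from below).
def Pre_max_total (n : Int) : Prop := 0 ≤ n
instance (n : Int) : Decidable (Pre_max_total n) := by unfold Pre_max_total; infer_instance
def pvWitness_max_total : Int := 1729

def Spec_max_total (n : Int) (out : Int) : Prop := out = max_total_alt n
instance (n : Int) (out : Int) : Decidable (Spec_max_total n out) := by unfold Spec_max_total; infer_instance

-- ===== CLAIM (what is proved, stated in full; the proofs are below) =====
def Claim_equal_max_total : Prop := ∀ (n : Int), Dom_max_total n → Pre_max_total n → Spec_max_total n (max_total n)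

-- ===== LEMMAS AND PROOFS =====

-- ---- digit_sum facts (A side) ----
theorem ds_fuel_bounds (f : Nat) : ∀ s n : Int,
    s ≤ digit_sum_fuel f s n ∧ (0 ≤ n → digit_sum_fuel f s n ≤ s + n) := by
  induction f with
  | zero => intro s n; simp [digit_sum_fuel]
  | succ f ih =>
    intro s n
    by_cases h : 0 < n
    · rw [digit_sum_fuel, if_pos h]
      have := ih (s + PySem.Int.mod n 10) (PySem.Int.floordiv n 10)
      rw [PySem.Int.mod_eq_emod_of_pos (by omega),
          PySem.Int.floordiv_eq_ediv_of_pos (by omega)] at this ⊢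
      omega
    · rw [digit_sum_fuel, if_neg h]; omega

theorem ds_fuel_lt (f : Nat) (s n : Int) (h10 : 10 ≤ n) :
    digit_sum_fuel (f + 1) s n < s + n := by
  rw [digit_sum_fuel, if_pos (by omega)]
  have := ds_fuel_bounds f (s + PySem.Int.mod n 10) (PySem.Int.floordiv n 10)
  rw [PySem.Int.mod_eq_emod_of_pos (by omega),
      PySem.Int.floordiv_eq_ediv_of_pos (by omega)] at this ⊢
  omega

theorem digit_sum_nonneg (n : Int) : 0 ≤ digit_sum n := (ds_fuel_bounds n.toNat 0 n).1

theorem digit_sum_lt (n : Int) (h : 10 ≤ n) : digit_sum n < n := by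
  have h1 : n.toNat = (n.toNat - 1) + 1 := by omega
  unfold digit_sum
  rw [h1]
  have := ds_fuel_lt (n.toNat - 1) 0 n h
  omega

-- ---- bit-counting over bytes ----
-- bcN m = Python (m).bit_count() for a natural m
def bcN (m : Nat) : Nat := PySem.Int.bitCount (m : Int)

theorem bcN_rec (m : Nat) : bcN m = m % 2 + bcN (m / 2) := by
  rcases Nat.eq_zero_or_pos m with h | h
  · subst h; simp [bcN, PySem.Int.bitCount_zero]
  · exact PySem.Int.bitCount_natCast h

theorem xor_div_two (a b : Nat) : (a ^^^ b) / 2 = a / 2 ^^^ b / 2 :=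
  Nat.eq_of_testBit_eq fun i => by simp [Nat.testBit_div_two, Nat.testBit_xor]

theorem byte_split_xor : ∀ (k x x' y y' : Nat), x < 2 ^ k → x' < 2 ^ k →
    bcN ((x + 2 ^ k * y) ^^^ (x' + 2 ^ k * y')) = bcN (x ^^^ x') + bcN (y ^^^ y') := by
  intro k
  induction k with
  | zero =>
    intro x x' y y' hx hx'
    have : x = 0 := by omega
    have : x' = 0 := by omega
    subst_vars
    simp [bcN, PySem.Int.bitCount_zero]
  | succ k ih =>
    intro x x' y y' hx hx'
    have h2 : 2 ^ (k + 1) = 2 * 2 ^ k := by ring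
    rw [bcN_rec ((x + 2 ^ (k + 1) * y) ^^^ (x' + 2 ^ (k + 1) * y')), bcN_rec (x ^^^ x')]
    have hm1 : ((x + 2 ^ (k + 1) * y) ^^^ (x' + 2 ^ (k + 1) * y')) % 2 = (x ^^^ x') % 2 := by
      rw [Nat.xor_mod_two_eq, Nat.xor_mod_two_eq, h2, mul_assoc 2 (2 ^ k) y,
        mul_assoc 2 (2 ^ k) y']
      omega
    have hd1 : (x + 2 ^ (k + 1) * y) / 2 = x / 2 + 2 ^ k * y := by
      rw [h2, mul_assoc 2 (2 ^ k) y]; omega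
    have hd2 : (x' + 2 ^ (k + 1) * y') / 2 = x' / 2 + 2 ^ k * y' := by
      rw [h2, mul_assoc 2 (2 ^ k) y']; omega
    rw [hm1, xor_div_two, hd1, hd2, ih _ _ _ _ (by omega) (by omega), xor_div_two]
    omega

theorem bc_split_xor (x x' y y' : Nat) (hx : x < 256) (hx' : x' < 256) :
    bcN ((x + 256 * y) ^^^ (x' + 256 * y')) = bcN (x ^^^ x') + bcN (y ^^^ y') :=
  byte_split_xor 8 x x' y y' hx hx'

theorem bc_split (x y : Nat) (hx : x < 256) : bcN (x + 256 * y) = bcN x + bcN y := by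
  have := bc_split_xor x 0 y 0 hx (by norm_num)
  simpa using this

theorem bc_cast (u : Int) (hu : 0 ≤ u) : PySem.Int.bitCount u = bcN u.toNat := by
  conv_lhs => rw [← Int.toNat_of_nonneg hu]
  rfl

-- out has only bits below `shift`, the shifted mask only bits above: or = add
theorem or_shift_add (k out m : Nat) (h : out < 2 ^ k) :
    out ||| (m <<< k) = out + 2 ^ k * m := by
  rw [Nat.shiftLeft_eq, Nat.lor_comm, mul_comm m (2 ^ k), ← Nat.two_pow_add_eq_or_of_lt h m]
  omega

-- ---- masks and packed values ----
def maskOf (d : Int) : Int := PySem.List.pyGetD DIGIT_MASKS d 0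

def packVal : List Int → Int
  | [] => 0
  | d :: t => maskOf d + 256 * packVal t

theorem maskOf_range (d : Int) (h0 : 0 ≤ d) (h10 : d < 10) :
    0 ≤ maskOf d ∧ maskOf d < 128 := by
  interval_cases d <;> decide

theorem packVal_nonneg : ∀ l : List Int, (∀ d ∈ l, 0 ≤ d ∧ d < 10) → 0 ≤ packVal l := by
  intro l
  induction l with
  | nil => intro _; simp [packVal]
  | cons d t ih =>
    intro h
    have hd := maskOf_range d (h d (by simp)).1 (h d (by simp)).2
    have ht := ih (fun x hx => h x (by simp [hx]))
    simp only [packVal]; omega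

-- ---- digitsB facts ----
theorem digitsB_fuel_congr : ∀ f g : Nat, ∀ n : Int, n.toNat ≤ f → n.toNat ≤ g →
    digitsB_fuel f n = digitsB_fuel g n := by
  intro f
  induction f with
  | zero =>
    intro g n hf _
    cases g with
    | zero => rfl
    | succ g => rw [digitsB_fuel, digitsB_fuel, if_pos (by omega)]
  | succ f ih =>
    intro g n hf hg
    cases g with
    | zero => rw [digitsB_fuel, digitsB_fuel, if_pos (by omega)]
    | succ g =>
      by_cases h : n < 10
      · rw [digitsB_fuel, digitsB_fuel, if_pos h, if_pos h]
      · rw [digitsB_fuel, digitsB_fuel, if_neg h, if_neg h]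
        rw [PySem.Int.floordiv_eq_ediv_of_pos (by omega)]
        exact congrArg _ (ih g (n / 10) (by omega) (by omega))

theorem digitsB_base (n : Int) (h : n < 10) : digitsB n = [n] := by
  unfold digitsB
  cases hn : n.toNat with
  | zero => rfl
  | succ f => rw [digitsB_fuel, if_pos h]

theorem digitsB_step (n : Int) (h : ¬ n < 10) :
    digitsB n = n % 10 :: digitsB (n / 10) := by
  unfold digitsB
  have hn : n.toNat = (n.toNat - 1) + 1 := by omega
  rw [hn, digitsB_fuel, if_neg h, PySem.Int.mod_eq_emod_of_pos (by omega),
      PySem.Int.floordiv_eq_ediv_of_pos (by omega)]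
  exact congrArg _ (digitsB_fuel_congr _ _ _ (by omega) (by omega))

theorem mem_digitsB : ∀ fuel : Nat, ∀ n : Int, n.toNat ≤ fuel → 0 ≤ n →
    ∀ d ∈ digitsB n, 0 ≤ d ∧ d < 10 := by
  intro fuel
  induction fuel with
  | zero =>
    intro n hf _h0 d hd
    rw [digitsB_base n (by omega)] at hd
    simp at hd; omega
  | succ fuel ih =>
    intro n hf h0 d hd
    by_cases h : n < 10
    · rw [digitsB_base n h] at hd; simp at hd; omega
    · rw [digitsB_step n h] at hd
      rcases List.mem_cons.mp hd with h1 | h1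
      · subst h1; omega
      · exact ih (n / 10) (by omega) (by omega) d h1

theorem sum_digitsB_aux : ∀ f : Nat, ∀ n : Int, 0 ≤ n → n.toNat ≤ f → ∀ s : Int,
    digit_sum_fuel f s n = s + (digitsB n).sum := by
  intro f
  induction f with
  | zero =>
    intro n h0 hf s
    have : n = 0 := by omega
    subst this
    rw [digitsB_base 0 (by omega)]
    simp [digit_sum_fuel]
  | succ f ih =>
    intro n h0 hf s
    by_cases h : 0 < n
    · rw [digit_sum_fuel, if_pos h]
      rw [PySem.Int.mod_eq_emod_of_pos (by omega), PySem.Int.floordiv_eq_ediv_of_pos (by omega)]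
      rw [ih (n / 10) (by omega) (by omega)]
      by_cases h10 : n < 10
      · rw [digitsB_base n h10]
        have : n / 10 = 0 := by omega
        rw [this, digitsB_base 0 (by omega)]
        simp; omega
      · rw [digitsB_step n h10]
        simp; omega
    · have : n = 0 := by omega
      subst this
      rw [digit_sum_fuel, if_neg h, digitsB_base 0 (by omega)]
      simp
theorem sum_digitsB (n : Int) (h : 0 ≤ n) : (digitsB n).sum = digit_sum n := by
  have := sum_digitsB_aux n.toNat n h (by omega) 0
  unfold digit_sum
  omega

theorem len_digitsB_le (n : Int) (_h0 : 0 ≤ n) (h : n < 10) : ¬ 1 < (digitsB n).length := by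
  rw [digitsB_base n h]; simp

theorem len_digitsB_gt (n : Int) (h : 10 ≤ n) : 1 < (digitsB n).length := by
  rw [digitsB_step n (by omega)]
  by_cases h2 : n / 10 < 10
  · rw [digitsB_base _ h2]; simp
  · rw [digitsB_step _ h2]; simp

theorem len_digitsB_mono : ∀ f : Nat, ∀ b a : Int, b.toNat ≤ f → 0 ≤ a → a ≤ b →
    (digitsB a).length ≤ (digitsB b).length := by
  intro f
  induction f with
  | zero =>
    intro b a hf h0 hab
    have : a = b := by omega
    subst this; exact le_refl _
  | succ f ih =>
    intro b a hf h0 hab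
    by_cases hb : b < 10
    · rw [digitsB_base a (by omega), digitsB_base b hb]
      simp
    · rw [digitsB_step b hb]
      by_cases ha : a < 10
      · rw [digitsB_base a ha]; simp
      · rw [digitsB_step a ha]
        simp only [List.length_cons, Nat.add_le_add_iff_right]
        exact ih (b / 10) (a / 10) (by omega) (by omega) (by omega)

-- ---- segments_of_number = packVal ∘ digitsB ----
theorem int_bor_shift (out m : Int) (k : Nat) (ho : 0 ≤ out) (hlt : out < 2 ^ k) (hm : 0 ≤ m) :
    PySem.Int.bor out (m <<< k) = out + 2 ^ k * m := by
  obtain ⟨a, rfl⟩ := Int.eq_ofNat_of_zero_le ho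
  obtain ⟨c, rfl⟩ := Int.eq_ofNat_of_zero_le hm
  have hcast : ((c : Int) <<< k) = ((c <<< k : Nat) : Int) := by simp [Int.natCast_shiftLeft]
  rw [hcast, PySem.Int.bor_of_nonneg (by omega) (by positivity)]
  have ha : a < 2 ^ k := by exact_mod_cast hlt
  rw [Int.toNat_natCast, Int.toNat_natCast, or_shift_add k a c ha]
  push_cast
  ring

theorem seg_fuel_zero (f : Nat) (out : Int) (shift : Nat) : seg_fuel f out shift 0 = out := by
  cases f with
  | zero => rfl
  | succ f => rw [seg_fuel, if_neg (by omega)]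

theorem seg_fuel_eq : ∀ f : Nat, ∀ n out : Int, ∀ shift : Nat, 0 < n → n.toNat ≤ f →
    0 ≤ out → out < 2 ^ shift →
    seg_fuel f out shift n = out + 2 ^ shift * packVal (digitsB n) := by
  intro f
  induction f with
  | zero => omega
  | succ f ih =>
    intro n out shift hn hf ho hlt
    rw [seg_fuel, if_pos hn]
    rw [PySem.Int.mod_eq_emod_of_pos (by omega), PySem.Int.floordiv_eq_ediv_of_pos (by omega)]
    have hmem : 0 ≤ n % 10 ∧ n % 10 < 10 := by omega
    have hmask := maskOf_range (n % 10) hmem.1 hmem.2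
    have hbor : PySem.Int.bor out ((PySem.List.pyGetD DIGIT_MASKS (n % 10) 0) <<< shift)
        = out + 2 ^ shift * maskOf (n % 10) :=
      int_bor_shift out (maskOf (n % 10)) shift ho hlt hmask.1
    by_cases h10 : n < 10
    · have hdiv : n / 10 = 0 := by omega
      rw [hdiv, seg_fuel_zero, hbor, digitsB_base n h10]
      have : n % 10 = n := by omega
      rw [this]
      simp [packVal]
    · have hp2 : (0 : Int) < 2 ^ shift := pow_pos (by norm_num) shift
      have hstep : 0 ≤ out + 2 ^ shift * maskOf (n % 10) := by nlinarith
      have hbound : out + 2 ^ shift * maskOf (n % 10) < 2 ^ (shift + 8) := by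
        have : (2 : Int) ^ (shift + 8) = 2 ^ shift * 256 := by rw [pow_add]; norm_num
        rw [this]
        nlinarith
      rw [hbor, ih (n / 10) _ (shift + 8) (by omega) (by omega) hstep hbound]
      rw [digitsB_step n h10]
      simp only [packVal]
      have : (2 : Int) ^ (shift + 8) = 2 ^ shift * 256 := by rw [pow_add]; norm_num
      rw [this]
      ring

theorem seg_eq (n : Int) (h : 0 ≤ n) : segments_of_number n = packVal (digitsB n) := by
  by_cases h0 : n = 0
  · subst h0
    rw [segments_of_number, if_pos rfl, digitsB_base 0 (by omega)]
    simp [packVal, maskOf]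
  · rw [segments_of_number, if_neg h0,
        seg_fuel_eq n.toNat n 0 0 (by omega) (le_refl _) (by omega) (by norm_num)]
    ring

-- ---- table lookups = per-digit popcounts ----
theorem xt_eq (a b : Int) (ha : 0 ≤ a) (ha' : a < 10) (hb : 0 ≤ b) (hb' : b < 10) :
    xtAt a b = (PySem.Int.bitCount (PySem.Int.bxor (maskOf a) (maskOf b)) : Int) := by
  interval_cases a <;> interval_cases b <;> decide

theorem on_eq (d : Int) (h0 : 0 ≤ d) (h10 : d < 10) :
    PySem.List.pyGetD ONt d 0 = (PySem.Int.bitCount (maskOf d) : Int) := by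
  interval_cases d <;> decide

-- bitCount ∘ bxor on nonnegative ints, through Nat
theorem bc_bxor_toNat (u v : Int) (hu : 0 ≤ u) (hv : 0 ≤ v) :
    PySem.Int.bitCount (PySem.Int.bxor u v) = bcN (u.toNat ^^^ v.toNat) := by
  rw [PySem.Int.bxor_of_nonneg hu hv]; rfl

theorem packXor : ∀ (A B : List Int), (∀ d ∈ A, 0 ≤ d ∧ d < 10) → (∀ d ∈ B, 0 ≤ d ∧ d < 10) →
    B.length ≤ A.length →
    (PySem.Int.bitCount (PySem.Int.bxor (packVal A) (packVal B)) : Int)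
      = ((A.zip B).map (fun p => xtAt p.1 p.2)).sum
        + ((A.drop B.length).map (fun d => PySem.List.pyGetD ONt d 0)).sum := by
  intro A
  induction A with
  | nil =>
    intro B hA hB hlen
    have : B = [] := by
      cases B with
      | nil => rfl
      | cons b t => simp at hlen
    subst this
    simp [packVal, PySem.Int.bitCount_zero]
  | cons a A' ih =>
    intro B hA hB hlen
    have ha := hA a (by simp)
    have hma := maskOf_range a ha.1 ha.2
    have hA' : ∀ d ∈ A', 0 ≤ d ∧ d < 10 := fun d hd => hA d (by simp [hd])
    have hpA' := packVal_nonneg A' hA'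
    cases B with
    | nil =>
      have ihe := ih [] hA' (by intro d hd; simp at hd) (by simp)
      simp only [packVal, PySem.Int.bxor_zero, List.zip_nil_right, List.map_nil, List.sum_nil,
        List.length_nil, List.drop_zero, zero_add] at ihe ⊢
      have hval : maskOf a + 256 * packVal A'
          = ((((maskOf a).toNat + 256 * (packVal A').toNat : Nat)) : Int) := by
        push_cast
        rw [Int.toNat_of_nonneg hma.1, Int.toNat_of_nonneg hpA']
      rw [hval]
      have hsplit : PySem.Int.bitCount ((((maskOf a).toNat + 256 * (packVal A').toNat : Nat)) : Int)
          = bcN (maskOf a).toNat + bcN (packVal A').toNat :=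
        bc_split (maskOf a).toNat (packVal A').toNat (by omega)
      rw [bc_cast (packVal A') hpA'] at ihe
      rw [hsplit]
      simp only [List.map_cons, List.sum_cons]
      rw [on_eq a ha.1 ha.2, bc_cast (maskOf a) hma.1]
      push_cast
      omega
    | cons b B' =>
      have hb := hB b (by simp)
      have hmb := maskOf_range b hb.1 hb.2
      have hB' : ∀ d ∈ B', 0 ≤ d ∧ d < 10 := fun d hd => hB d (by simp [hd])
      have hpB' := packVal_nonneg B' hB'
      have ihe := ih B' hA' hB' (by simpa using hlen)
      simp only [packVal]
      rw [bc_bxor_toNat _ _ (by omega) (by omega)] at ihe ⊢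
      have h1 : (maskOf a + 256 * packVal A').toNat
          = (maskOf a).toNat + 256 * (packVal A').toNat := by omega
      have h2 : (maskOf b + 256 * packVal B').toNat
          = (maskOf b).toNat + 256 * (packVal B').toNat := by omega
      rw [h1, h2, bc_split_xor _ _ _ _ (by omega) (by omega)]
      simp only [List.zip_cons_cons, List.map_cons, List.sum_cons, List.length_cons,
        List.drop_succ_cons]
      rw [xt_eq a b ha.1 ha.2 hb.1 hb.2]
      have : PySem.Int.bitCount (PySem.Int.bxor (maskOf a) (maskOf b))
          = bcN ((maskOf a).toNat ^^^ (maskOf b).toNat) :=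
        bc_bxor_toNat _ _ (by omega) (by omega)
      rw [this]
      push_cast [ihe]
      ring

-- sum(ON[d] for d in digits of m) = popcount of the whole display
theorem sumON_eq (m : Int) (h : 0 ≤ m) :
    sumON (digitsB m) = (PySem.Int.bitCount (segments_of_number m) : Int) := by
  have := packXor (digitsB m) [] (mem_digitsB m.toNat m (le_refl _) h)
    (by intro d hd; simp at hd) (by simp)
  simp only [List.zip_nil_right, List.map_nil, List.sum_nil, List.length_nil, List.drop_zero,
    zero_add, packVal, PySem.Int.bxor_zero] at this
  rw [sumON, seg_eq m h]
  exact this.symm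

-- ---- the digit-sum chain and the pair-sum of transitions ----
def chain_fuel : Nat → Int → List Int
  | 0, n => [n]
  | f + 1, n => if 10 ≤ n then n :: chain_fuel f (digit_sum n) else [n]

def chainF (n : Int) : List Int := chain_fuel (n.toNat + 1) n

theorem chain_fuel_congr : ∀ f g : Nat, ∀ n : Int, n.toNat < f → n.toNat < g →
    chain_fuel f n = chain_fuel g n := by
  intro f
  induction f with
  | zero => omega
  | succ f ih =>
    intro g n hf hg
    match g, hg with
    | g + 1, _ =>
      by_cases h : 10 ≤ n
      · rw [chain_fuel, chain_fuel, if_pos h, if_pos h]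
        have hd1 := digit_sum_lt n h
        have hd2 := digit_sum_nonneg n
        exact congrArg _ (ih _ _ (by omega) (by omega))
      · rw [chain_fuel, chain_fuel, if_neg h, if_neg h]

theorem chainF_step (n : Int) (h : 10 ≤ n) : chainF n = n :: chainF (digit_sum n) := by
  unfold chainF
  rw [chain_fuel, if_pos h]
  have hd1 := digit_sum_lt n h
  have hd2 := digit_sum_nonneg n
  exact congrArg _ (chain_fuel_congr _ _ _ (by omega) (by omega))

theorem chainF_base (n : Int) (h : ¬ 10 ≤ n) : chainF n = [n] := by
  unfold chainF
  rw [chain_fuel, if_neg h]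

def pairSum : List Int → Int
  | a :: b :: t => (PySem.Int.bitCount (PySem.Int.bxor a b) : Int) + pairSum (b :: t)
  | _ => 0

-- A's loop equals the pair-sum over the mask chain continued by the black screen
theorem loop_eq_pairSum : ∀ f : Nat, ∀ n : Int, n.toNat < f → 0 ≤ n → ∀ total prev : Int,
    max_total_fuel f total prev n
      = total + pairSum (prev :: (chainF n).map segments_of_number ++ [0]) := by
  intro f
  induction f with
  | zero => omega
  | succ f ih =>
    intro n hf hn total prev
    by_cases h : n < 10
    · rw [max_total_fuel]
      simp only [if_pos h]
      rw [chainF_base n (by omega)]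
      simp only [List.map_cons, List.map_nil, List.nil_append, List.cons_append, pairSum,
        PySem.Int.bxor_zero]
      rw [PySem.Int.bxor_comm]
      ring
    · rw [max_total_fuel]
      simp only [if_neg h]
      have hd1 := digit_sum_lt n (by omega)
      have hd2 := digit_sum_nonneg n
      rw [chainF_step n (by omega)]
      rw [ih (digit_sum n) (by omega) hd2]
      simp only [List.map_cons, List.cons_append, pairSum]
      rw [PySem.Int.bxor_comm]
      ring

-- B's loop equals the same pair-sum (without the initial blank transition)
theorem loopB_eq_pairSum : ∀ f : Nat, ∀ m : Int, 0 ≤ m → m.toNat < f → ∀ t : Int,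
    loopB f t (digitsB m) = t + pairSum ((chainF m).map segments_of_number ++ [0]) := by
  intro f
  induction f with
  | zero => omega
  | succ f ih =>
    intro m hm hf t
    by_cases h : m < 10
    · rw [loopB]
      simp only [if_neg (len_digitsB_le m hm h)]
      rw [chainF_base m (by omega)]
      simp only [List.map_cons, List.map_nil, List.nil_append, List.cons_append, pairSum,
        PySem.Int.bxor_zero]
      rw [sumON_eq m hm]
      ring
    · have h10 : 10 ≤ m := by omega
      have hd1 := digit_sum_lt m h10
      have hd2 := digit_sum_nonneg m
      rw [loopB]
      simp only [if_pos (len_digitsB_gt m h10)]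
      rw [sum_digitsB m hm]
      simp only [sumON]
      have hA := mem_digitsB m.toNat m (le_refl _) hm
      have hB := mem_digitsB (digit_sum m).toNat (digit_sum m) (le_refl _) hd2
      have hlen : (digitsB (digit_sum m)).length ≤ (digitsB m).length :=
        len_digitsB_mono m.toNat m (digit_sum m) (le_refl _) hd2 (by omega)
      have hstep := packXor (digitsB m) (digitsB (digit_sum m)) hA hB hlen
      rw [ih (digit_sum m) hd2 (by omega)]
      rw [chainF_step m h10]
      have hhead : ∃ r, chainF (digit_sum m) = digit_sum m :: r := by
        by_cases hh : 10 ≤ digit_sum m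
        · exact ⟨_, chainF_step _ hh⟩
        · exact ⟨[], chainF_base _ hh⟩
      obtain ⟨r, hr⟩ := hhead
      rw [hr]
      simp only [List.map_cons, List.cons_append, pairSum]
      rw [← seg_eq m hm, ← seg_eq (digit_sum m) hd2] at hstep
      rw [hstep]
      ring

-- ===== VERDICT (by name: the statement is the Claim_ definition above) =====
theorem max_total_spec : Claim_equal_max_total := by
  intro n _ hpre
  unfold Spec_max_total max_total max_total_alt
  rw [loop_eq_pairSum (n.toNat + 1) n (by omega) hpre,
      loopB_eq_pairSum (n.toNat + 1) n hpre (by omega)]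
  have hhead : ∃ r, chainF n = n :: r := by
    by_cases hh : 10 ≤ n
    · exact ⟨_, chainF_step _ hh⟩
    · exact ⟨[], chainF_base _ hh⟩
  obtain ⟨r, hr⟩ := hhead
  rw [hr]
  simp only [List.map_cons, List.cons_append, pairSum]
  rw [PySem.Int.bxor_comm, PySem.Int.bxor_zero, sumON_eq n hpre]
  ring
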